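-- pv_equiv track=rewrite | github.com/MrBrantCode/unitest_baseline | mut_generate/mist_train_cf/cf_15217/solution.py | delete_and_sum
-- ===== SOURCE A (Python) =====
-- def delete_and_sum(mylist):
--     total_sum = 0
--     i = 0
--     while i < len(mylist):
--         if mylist[i] == 3:
--             del mylist[i]
--         else:
--             total_sum += mylist[i]
--             i += 1
--     return total_sum
-- ===== SOURCE B (Python) =====
-- def delete_and_sum(mylist):
--     while 3 in mylist:
--         mylist.remove(3)
--     return sum(mylist)
-- ===== Notes on version B (the rewrite author's own statement) =====
-- stated objective: idiomatic
-- what changed: Replaced the single interleaved index-walk that deletes 3s while accumulating a running total with two idiomatic phases: remove every 3 in place via while 3 in mylist: mylist.remove(3), then return sum(mylist).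
import Mathlib
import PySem

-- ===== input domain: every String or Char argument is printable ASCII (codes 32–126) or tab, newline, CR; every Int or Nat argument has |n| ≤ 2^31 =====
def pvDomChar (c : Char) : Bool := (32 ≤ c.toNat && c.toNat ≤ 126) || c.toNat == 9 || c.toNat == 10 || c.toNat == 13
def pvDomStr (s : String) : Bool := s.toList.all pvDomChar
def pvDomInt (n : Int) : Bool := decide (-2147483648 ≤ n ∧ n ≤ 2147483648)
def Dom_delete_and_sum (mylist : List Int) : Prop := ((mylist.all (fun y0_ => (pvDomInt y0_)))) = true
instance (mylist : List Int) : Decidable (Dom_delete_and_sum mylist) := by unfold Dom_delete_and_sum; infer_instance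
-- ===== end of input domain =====

-- B: two idiomatic phases (remove all 3s in place, then sum) instead of A's interleaved
-- index-walk; same in-place mutation of the argument list, return value proved equal.
-- ===== PORT A =====
-- the while loop of A: index walk, deleting at i when mylist[i] == 3
def pvLoopA (lst : List Int) (i : Nat) (total : Int) : Int :=
  if h : i < lst.length then
    if lst[i] = 3 then pvLoopA (lst.eraseIdx i) i total
    else pvLoopA lst (i + 1) (total + lst[i])
  else total
termination_by lst.length - i
decreasing_by
  · simp [List.length_eraseIdx, h]; omega
  · omega

def delete_and_sum (mylist : List Int) : Int := pvLoopA mylist 0 0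

-- ===== PORT B =====
-- while 3 in mylist: mylist.remove(3)   (list.remove = erase first occurrence)
def pvRemoveAll (lst : List Int) : List Int :=
  if h : (3 : Int) ∈ lst then pvRemoveAll (lst.erase 3) else lst
termination_by lst.length
decreasing_by have h1 := List.length_pos_of_mem h; simp [h]; omega

def delete_and_sum_alt (mylist : List Int) : Int := (pvRemoveAll mylist).sum

-- ===== PRECONDITION & SPEC =====
def Spec_delete_and_sum (mylist : List Int) (out : Int) : Prop := out = delete_and_sum_alt mylist
instance (mylist : List Int) (out : Int) : Decidable (Spec_delete_and_sum mylist out) := by unfold Spec_delete_and_sum; infer_instance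

-- ===== CLAIM (what is proved, stated in full; the proofs are below) =====
def Claim_equal_delete_and_sum : Prop := ∀ (mylist : List Int), Dom_delete_and_sum mylist → Spec_delete_and_sum mylist (delete_and_sum mylist)

-- ===== LEMMAS AND PROOFS =====

-- ===== VERDICT (by name: the statement is the Claim_ definition above) =====
lemma pvLoopA_eq (lst : List Int) (i : Nat) (total : Int) :
    pvLoopA lst i total = total + ((lst.drop i).filter (fun x => x ≠ 3)).sum := by
  induction lst, i, total using pvLoopA.induct with
  | case1 lst i total h h3 ih =>
    rw [pvLoopA, dif_pos h, if_pos h3, ih]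
    have hd : lst.drop i = lst[i] :: lst.drop (i + 1) := List.drop_eq_getElem_cons h
    have he : (lst.eraseIdx i).drop i = lst.drop (i + 1) := by
      rw [List.eraseIdx_eq_take_drop_succ]
      exact List.drop_left' (List.length_take_of_le (Nat.le_of_lt h))
    rw [he, hd, List.filter_cons]
    simp [h3]
  | case2 lst i total h h3 ih =>
    rw [pvLoopA, dif_pos h, if_neg h3, ih]
    have hd : lst.drop i = lst[i] :: lst.drop (i + 1) := List.drop_eq_getElem_cons h
    rw [hd, List.filter_cons]
    have hk : (decide (lst[i] ≠ 3)) = true := by simp [h3]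
    rw [if_pos hk, List.sum_cons]
    ring
  | case3 lst i total h =>
    rw [pvLoopA, dif_neg h]
    simp [List.drop_eq_nil_of_le (Nat.le_of_not_lt h)]

lemma pvFilter_erase (l : List Int) :
    (l.erase 3).filter (fun x => x ≠ 3) = l.filter (fun x => x ≠ 3) := by
  induction l with
  | nil => simp
  | cons a t ih =>
    by_cases ha : a = 3
    · subst ha; simp
    · rw [List.erase_cons_tail (by simp [ha]), List.filter_cons, List.filter_cons, ih]

lemma pvRemoveAll_eq (lst : List Int) :
    pvRemoveAll lst = lst.filter (fun x => x ≠ 3) := by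
  induction lst using pvRemoveAll.induct with
  | case1 lst h ih =>
    rw [pvRemoveAll, dif_pos h, ih]
    exact pvFilter_erase lst
  | case2 lst h =>
    rw [pvRemoveAll, dif_neg h]
    exact (List.filter_eq_self.mpr (fun a ha => by
      simp only [ne_eq, decide_eq_true_eq]
      exact fun hc => h (hc ▸ ha))).symm

theorem delete_and_sum_spec : Claim_equal_delete_and_sum := by
  intro mylist _
  unfold Spec_delete_and_sum delete_and_sum delete_and_sum_alt
  rw [pvLoopA_eq, pvRemoveAll_eq]
  simp
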